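-- pv_equiv track=rewrite | github.com/JBreece/JoshPy | rosalind/rosalind.py | mortal_rabbits
-- ===== SOURCE A (Python) =====
-- def mortal_rabbits(n, m):
--     sequence = [1, 1]
--
--     for i in range(n - 2):
--         new_num = 0
--         if i + 2 < m:
--             #Normal fibonacci - No deaths yet
--             new_num = sequence[i] + sequence[i + 1]
--         else:
--             #Different reoccurence relation - Accounting for death
--             for j in range(m - 1):
--                 new_num += sequence[i - j]
--
--         sequence.append(new_num)
--
--     return sequence
-- ===== SOURCE B (Python) =====
-- def mortal_rabbits(n, m):
--     # O(n) via the standard mortal-Fibonacci recurrence: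
--     #   F(k) = F(k-1) + F(k-2)            for k < m   (no deaths yet)
--     #   F(m) = F(m-1) + F(m-2) - 1        (the first pair dies)
--     #   F(k) = F(k-1) + F(k-2) - F(k-m-1) for k > m   (pairs born m+1 months ago die)
--     seq = [1, 1]
--     if m < 2:
--         # lifespan shorter than the maturation time: no pair ever reproduces
--         seq.extend([0] * (n - 2))
--         return seq
--     for k in range(2, n):
--         if k < m:
--             new = seq[k - 1] + seq[k - 2]
--         elif k == m:
--             new = seq[k - 1] + seq[k - 2] - 1
--         else:
--             new = seq[k - 1] + seq[k - 2] - seq[k - m - 1]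
--         seq.append(new)
--     return seq
-- ===== Notes on version B (the rewrite author's own statement) =====
-- stated objective: faster
-- what changed: B replaces A's inner loop that re-sums the last m-1 terms at every step with the constant-time mortal-Fibonacci recurrence F(k)=F(k-1)+F(k-2)-F(k-m-1) (with F(m)=F(m-1)+F(m-2)-1, and a direct zero-fill when m<2), turning O(n*m) work into O(n).
import Mathlib
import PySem

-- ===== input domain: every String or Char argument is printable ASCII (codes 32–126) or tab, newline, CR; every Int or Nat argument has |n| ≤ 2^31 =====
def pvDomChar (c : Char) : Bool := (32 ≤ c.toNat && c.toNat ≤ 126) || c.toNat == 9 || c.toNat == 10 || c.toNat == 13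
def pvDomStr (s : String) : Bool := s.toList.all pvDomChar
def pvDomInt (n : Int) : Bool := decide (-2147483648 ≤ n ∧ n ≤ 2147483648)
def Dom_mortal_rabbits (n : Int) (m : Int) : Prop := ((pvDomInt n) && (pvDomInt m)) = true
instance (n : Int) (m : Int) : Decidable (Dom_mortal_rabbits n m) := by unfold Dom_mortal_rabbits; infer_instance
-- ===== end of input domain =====

-- B replaces A's O(m) re-summing inner loop by the O(1)-per-step mortal-Fibonacci
-- recurrence F(k)=F(k-1)+F(k-2)-F(k-m-1) (with F(m)=F(m-1)+F(m-2)-1); objective: faster.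

-- ===== PORT A =====
-- All list indices A uses are provably in range and non-negative (in the else
-- branch j ≤ m-2 ≤ i), so Python never raises and pyGetD with default 0 is exact.
def mortal_rabbits (n : Int) (m : Int) : List Int :=
  (PySem.List.pyRange 0 (n - 2) 1).foldl
    (fun sequence i =>
      let new_num : Int :=
        if i + 2 < m then
          PySem.List.pyGetD sequence i 0 + PySem.List.pyGetD sequence (i + 1) 0
        else
          (PySem.List.pyRange 0 (m - 1) 1).foldl
            (fun acc j => acc + PySem.List.pyGetD sequence (i - j) 0) 0
      sequence ++ [new_num])
    [1, 1]

-- ===== PORT B =====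
def mortal_rabbits_alt (n : Int) (m : Int) : List Int :=
  if m < 2 then
    -- lifespan shorter than maturation: no pair ever reproduces
    [1, 1] ++ List.replicate (n - 2).toNat 0
  else
    (PySem.List.pyRange 2 n 1).foldl
      (fun seq k =>
        let new : Int :=
          if k < m then
            PySem.List.pyGetD seq (k - 1) 0 + PySem.List.pyGetD seq (k - 2) 0
          else if k = m then
            PySem.List.pyGetD seq (k - 1) 0 + PySem.List.pyGetD seq (k - 2) 0 - 1
          else
            PySem.List.pyGetD seq (k - 1) 0 + PySem.List.pyGetD seq (k - 2) 0
              - PySem.List.pyGetD seq (k - m - 1) 0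
        seq ++ [new])
      [1, 1]

-- ===== PRECONDITION & SPEC =====
def Spec_mortal_rabbits (n : Int) (m : Int) (out : List Int) : Prop := out = mortal_rabbits_alt n m
instance (n : Int) (m : Int) (out : List Int) : Decidable (Spec_mortal_rabbits n m out) := by unfold Spec_mortal_rabbits; infer_instance

-- ===== CLAIM (what is proved, stated in full; the proofs are below) =====
def Claim_equal_mortal_rabbits : Prop := ∀ (n : Int) (m : Int), Dom_mortal_rabbits n m → Spec_mortal_rabbits n m (mortal_rabbits n m)

-- ===== LEMMAS AND PROOFS =====

-- the canonical sequence both programs compute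
def fseq (m : Int) : Nat → Int
  | 0 => 1
  | 1 => 1
  | (k + 2) =>
    if (k : Int) + 2 < m then fseq m (k + 1) + fseq m k
    else ∑ j ∈ Finset.range (m - 1).toNat, fseq m (k - j)
termination_by k => k
decreasing_by all_goals omega

-- A's loop body, named for the proofs (mortal_rabbits n m unfolds to a fold of stepA)
def stepA (m : Int) (sequence : List Int) (i : Int) : List Int :=
  let new_num : Int :=
    if i + 2 < m then
      PySem.List.pyGetD sequence i 0 + PySem.List.pyGetD sequence (i + 1) 0
    else
      (PySem.List.pyRange 0 (m - 1) 1).foldl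
        (fun acc j => acc + PySem.List.pyGetD sequence (i - j) 0) 0
  sequence ++ [new_num]

def stepB (m : Int) (seq : List Int) (k : Int) : List Int :=
  let new : Int :=
    if k < m then
      PySem.List.pyGetD seq (k - 1) 0 + PySem.List.pyGetD seq (k - 2) 0
    else if k = m then
      PySem.List.pyGetD seq (k - 1) 0 + PySem.List.pyGetD seq (k - 2) 0 - 1
    else
      PySem.List.pyGetD seq (k - 1) 0 + PySem.List.pyGetD seq (k - 2) 0
        - PySem.List.pyGetD seq (k - m - 1) 0
  seq ++ [new]

lemma portA_eq (n m : Int) :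
    mortal_rabbits n m = (PySem.List.pyRange 0 (n - 2) 1).foldl (stepA m) [1, 1] := rfl

lemma portB_eq (n m : Int) (h : ¬ m < 2) :
    mortal_rabbits_alt n m = (PySem.List.pyRange 2 n 1).foldl (stepB m) [1, 1] := by
  unfold mortal_rabbits_alt
  rw [if_neg h]
  rfl

-- indexing the canonical prefix
lemma getD_map_range_fseq (m : Int) (c k : Nat) (hk : k < c) :
    PySem.List.pyGetD ((List.range c).map (fseq m)) (k : Int) 0 = fseq m k := by
  rw [PySem.List.pyGetD_natCast]
  rw [List.getD_eq_getElem ((List.range c).map (fseq m)) 0 (by simpa using hk)]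
  simp

-- list-sum over a range is the Finset sum
lemma sum_map_range_eq (c : Nat) (h : Nat → Int) :
    ((List.range c).map h).sum = ∑ j ∈ Finset.range c, h j := by
  induction c with
  | zero => simp
  | succ c ih => rw [List.range_succ, Finset.sum_range_succ]; simp [ih]

-- Fibonacci prefix-sum identity, valid while no pair has died yet
lemma fseq_fib_sum (m : Int) (t : Nat) (ht : (t : Int) ≤ m - 2) :
    ∑ j ∈ Finset.range (t + 1), fseq m j = fseq m (t + 1) + fseq m t - 1 := by
  induction t with
  | zero => simp [fseq]
  | succ t ih =>
    rw [Finset.sum_range_succ, ih (by omega)]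
    have : fseq m (t + 2) = fseq m (t + 1) + fseq m t := by
      rw [fseq]; rw [if_pos (by omega)]
    rw [this]; ring

-- the first death: F(m) = F(m-1) + F(m-2) - 1
lemma fseq_at_m (m : Int) (hm : 2 ≤ m) (t : Nat) (ht : (t : Int) + 2 = m) :
    fseq m (t + 2) = fseq m (t + 1) + fseq m t - 1 := by
  rw [fseq, if_neg (by omega)]
  have hμ : (m - 1).toNat = t + 1 := by omega
  rw [hμ]
  have : ∑ j ∈ Finset.range (t + 1), fseq m (t - j)
       = ∑ j ∈ Finset.range (t + 1), fseq m j := by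
    rw [← Finset.sum_range_reflect]
    apply Finset.sum_congr rfl
    intro j hj
    simp only [Finset.mem_range] at hj
    congr 1
    omega
  rw [this, fseq_fib_sum m t (by omega)]

-- the steady state: F(k) = F(k-1) + F(k-2) - F(k-m-1)
lemma fseq_tel (m : Int) (hm : 2 ≤ m) (t : Nat) (ht : m < (t : Int) + 2) :
    fseq m (t + 2) = fseq m (t + 1) + fseq m t - fseq m (t + 1 - m.toNat) := by
  have hM : 2 ≤ m.toNat := by omega
  have htM : m.toNat ≤ t + 1 := by omega
  set M := m.toNat with hMdef
  have hμ : (m - 1).toNat = M - 1 := by omega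
  have h1 : fseq m (t + 2) = ∑ j ∈ Finset.range (M - 1), fseq m (t - j) := by
    rw [fseq, if_neg (by omega), hμ]
  obtain ⟨t', rfl⟩ : ∃ t', t = t' + 1 := ⟨t - 1, by omega⟩
  have h2 : fseq m (t' + 2) = ∑ j ∈ Finset.range (M - 1), fseq m (t' - j) := by
    rw [fseq, if_neg (by omega), hμ]
  obtain ⟨s, hs⟩ : ∃ s, M - 1 = s + 1 := ⟨M - 2, by omega⟩
  rw [h1, hs, Finset.sum_range_succ']
  have h3 : ∑ j ∈ Finset.range s, fseq m (t' + 1 - (j + 1))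
          = ∑ j ∈ Finset.range (s + 1), fseq m (t' - j) - fseq m (t' - s) := by
    rw [Finset.sum_range_succ]
    have : ∀ j, j ∈ Finset.range s → fseq m (t' + 1 - (j + 1)) = fseq m (t' - j) := by
      intro j _; congr 1; omega
    rw [Finset.sum_congr rfl this]; ring
  rw [h3, ← hs, ← h2]
  have e1 : t' + 1 - 0 = t' + 1 := rfl
  have e2 : t' - s = t' + 1 + 1 - M := by omega
  rw [e1, e2]; ring

-- A's invariant: after t iterations the state is the canonical prefix of length t+2
lemma stateA (m : Int) (t : Nat) :
    (PySem.List.pyRange 0 (t : Int) 1).foldl (stepA m) [1, 1]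
      = (List.range (t + 2)).map (fseq m) := by
  induction t with
  | zero =>
    rw [Nat.cast_zero, PySem.List.pyRange_one_eq_nil (by omega)]
    simp [List.range_succ, fseq]
  | succ t ih =>
    have hc : ((t + 1 : Nat) : Int) = (t : Int) + 1 := by push_cast; ring
    rw [hc, PySem.List.pyRange_one_succ_right (by omega), List.foldl_append, ih]
    show stepA m ((List.range (t + 2)).map (fseq m)) (t : Int) = _
    simp only [stepA]
    set S := (List.range (t + 2)).map (fseq m) with hS
    have hnew :
        (if (t : Int) + 2 < m then
          PySem.List.pyGetD S (t : Int) 0 + PySem.List.pyGetD S ((t : Int) + 1) 0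
        else
          (PySem.List.pyRange 0 (m - 1) 1).foldl
            (fun acc j => acc + PySem.List.pyGetD S ((t : Int) - j) 0) 0)
        = fseq m (t + 2) := by
      by_cases hcnd : (t : Int) + 2 < m
      · rw [if_pos hcnd]
        have h1 : ((t : Int) + 1) = ((t + 1 : Nat) : Int) := by push_cast; ring
        rw [h1, getD_map_range_fseq m (t + 2) t (by omega),
            getD_map_range_fseq m (t + 2) (t + 1) (by omega)]
        rw [fseq, if_pos hcnd]; ring
      · rw [if_neg hcnd]
        rw [PySem.List.foldl_add]
        rw [PySem.List.pyRange_one]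
        simp only [sub_zero, List.map_map]
        rw [sum_map_range_eq]
        rw [fseq, if_neg hcnd]
        rw [zero_add]
        apply Finset.sum_congr rfl
        intro j hj
        simp only [Finset.mem_range] at hj
        show PySem.List.pyGetD S ((t : Int) - ((0 : Int) + (j : Nat))) 0 = fseq m (t - j)
        have h1 : (t : Int) - ((0 : Int) + (j : Nat)) = ((t - j : Nat) : Int) := by omega
        rw [h1, getD_map_range_fseq m (t + 2) (t - j) (by omega)]
    rw [hnew]
    have : t + 1 + 2 = (t + 2) + 1 := rfl
    rw [this, List.range_succ, List.map_append]
    simp [hS]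

-- B's invariant
lemma stateB (m : Int) (hm : 2 ≤ m) (t : Nat) :
    (PySem.List.pyRange 2 ((t : Int) + 2) 1).foldl (stepB m) [1, 1]
      = (List.range (t + 2)).map (fseq m) := by
  induction t with
  | zero =>
    rw [Nat.cast_zero, zero_add, PySem.List.pyRange_one_eq_nil (by omega)]
    simp [List.range_succ, fseq]
  | succ t ih =>
    have hc : ((t + 1 : Nat) : Int) + 2 = ((t : Int) + 2) + 1 := by push_cast; ring
    rw [hc, PySem.List.pyRange_one_succ_right (by omega), List.foldl_append, ih]
    show stepB m ((List.range (t + 2)).map (fseq m)) ((t : Int) + 2) = _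
    simp only [stepB]
    set S := (List.range (t + 2)).map (fseq m) with hS
    have g1 : (t : Int) + 2 - 1 = ((t + 1 : Nat) : Int) := by push_cast; ring
    have g2 : (t : Int) + 2 - 2 = ((t : Nat) : Int) := by ring
    have hnew :
        (if (t : Int) + 2 < m then
          PySem.List.pyGetD S ((t : Int) + 2 - 1) 0 + PySem.List.pyGetD S ((t : Int) + 2 - 2) 0
        else if (t : Int) + 2 = m then
          PySem.List.pyGetD S ((t : Int) + 2 - 1) 0 + PySem.List.pyGetD S ((t : Int) + 2 - 2) 0 - 1
        else
          PySem.List.pyGetD S ((t : Int) + 2 - 1) 0 + PySem.List.pyGetD S ((t : Int) + 2 - 2) 0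
            - PySem.List.pyGetD S ((t : Int) + 2 - m - 1) 0)
        = fseq m (t + 2) := by
      rw [g1, g2, getD_map_range_fseq m (t + 2) (t + 1) (by omega),
          getD_map_range_fseq m (t + 2) t (by omega)]
      by_cases hcnd : (t : Int) + 2 < m
      · rw [if_pos hcnd, fseq, if_pos hcnd]
      · rw [if_neg hcnd]
        by_cases he : (t : Int) + 2 = m
        · rw [if_pos he, fseq_at_m m hm t he]
        · rw [if_neg he]
          have h1 : (t : Int) + 2 - m - 1 = ((t + 1 - m.toNat : Nat) : Int) := by omega
          rw [h1, getD_map_range_fseq m (t + 2) (t + 1 - m.toNat) (by omega)]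
          rw [fseq_tel m hm t (by omega)]
    rw [hnew]
    have : t + 1 + 2 = (t + 2) + 1 := rfl
    rw [this, List.range_succ, List.map_append]
    simp [hS]

-- for m < 2 the canonical sequence is 0 from index 2 on
lemma map_fseq_small (m : Int) (hm : m < 2) (c : Nat) :
    (List.range (c + 2)).map (fseq m) = [1, 1] ++ List.replicate c 0 := by
  induction c with
  | zero => simp [fseq, List.range_succ]
  | succ c ih =>
    rw [List.range_succ, List.map_append, ih]
    have : fseq m (c + 2) = 0 := by
      rw [fseq, if_neg (by omega)]
      have : (m - 1).toNat = 0 := by omega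
      simp [this]
    simp [this, List.replicate_succ']

-- ===== VERDICT (by name: the statement is the Claim_ definition above) =====
theorem mortal_rabbits_spec : Claim_equal_mortal_rabbits := by
  intro n m _
  show mortal_rabbits n m = mortal_rabbits_alt n m
  by_cases hn : n < 2
  · rw [portA_eq, PySem.List.pyRange_one_eq_nil (by omega)]
    by_cases hm : m < 2
    · simp [mortal_rabbits_alt, hm, Int.toNat_of_nonpos (by omega : n - 2 ≤ 0)]
    · rw [portB_eq n m hm, PySem.List.pyRange_one_eq_nil (by omega)]
      rfl
  · set c := (n - 2).toNat with hcdef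
    have hc : n - 2 = (c : Int) := by omega
    have hA : mortal_rabbits n m = (List.range (c + 2)).map (fseq m) := by
      rw [portA_eq, hc, stateA]
    by_cases hm : m < 2
    · rw [hA, map_fseq_small m hm]
      simp [mortal_rabbits_alt, hm]
      exact hcdef
    · have hn2 : n = (c : Int) + 2 := by omega
      rw [hA, portB_eq n m hm, hn2, stateB m (by omega) c]
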